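-- pv_equiv track=rewrite | github.com/Sandy0301/2017A2CS | Ch25:/recursion1.py | parenBit
-- ===== SOURCE A (Python) =====
-- def parenBit(str):
--     if str=='':
--         return ''
--     if len(str)>=2 and str[0]!='(':
--         return parenBit(str[1:])
--     if len(str)>=2 and str[-1]!=')':
--         return parenBit(str[:-1])
--     return str
-- ===== SOURCE B (Python) =====
-- def parenBit(str):
--     if str == '':
--         return ''
--     i = str.find('(')
--     if i == -1:
--         i = len(str) - 1
--     t = str[i:]
--     j = t.rfind(')')
--     if j == -1:
--         j = 0
--     return t[:j + 1]
-- ===== Notes on version B (the rewrite author's own statement) =====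
-- stated objective: faster
-- what changed: Replaces the character-at-a-time recursive stripping (one slice copy per recursive call) with two library searches (find '(' , rfind ')') and a single pair of slices, keeping one character when either paren is absent.
import Mathlib
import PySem

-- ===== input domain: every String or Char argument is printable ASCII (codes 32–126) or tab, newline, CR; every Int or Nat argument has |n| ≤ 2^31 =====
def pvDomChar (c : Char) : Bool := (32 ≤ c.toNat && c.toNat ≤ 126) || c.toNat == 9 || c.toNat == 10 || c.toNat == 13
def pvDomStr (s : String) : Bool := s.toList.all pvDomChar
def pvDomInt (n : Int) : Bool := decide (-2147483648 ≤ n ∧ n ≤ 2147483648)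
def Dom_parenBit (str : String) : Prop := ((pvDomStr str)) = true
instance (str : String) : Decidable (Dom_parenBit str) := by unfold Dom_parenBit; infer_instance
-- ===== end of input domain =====

-- B replaces A's one-character-at-a-time recursive stripping with two library
-- searches (find '(' and rfind ')') and a single pair of slices: objective faster.

-- ===== PORT A =====
-- A's recursion, transliterated on the code-point list (String is a wrapper, as in PySem).
def parenBitGo (s : List Char) : List Char :=
  if s = [] then []
  else if 2 ≤ s.length ∧ ¬ PySem.List.pyGet? s 0 = some '(' then
    parenBitGo (PySem.List.slice s (some 1) none)        -- str[1:]
  else if 2 ≤ s.length ∧ ¬ PySem.List.pyGet? s (-1) = some ')' then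
    parenBitGo (PySem.List.slice s none (some (-1)))     -- str[:-1]
  else s
termination_by s.length
decreasing_by
  · rw [PySem.List.slice_from_one]
    rcases s with _ | ⟨a, t⟩
    · simp_all
    · simp
  · rw [PySem.List.slice_to_neg_one]
    rcases s with _ | ⟨a, t⟩
    · simp_all
    · simp

def parenBit (str : String) : String := String.ofList (parenBitGo str.toList)

-- ===== PORT B =====
-- B's code (Source B), transliterated on the code-point list.
def parenBitAltGo (s : List Char) : List Char :=
  if s = [] then []
  else
    let i0 := PySem.Chars.find s ['(']                    -- str.find('(')
    let i := if i0 = -1 then (s.length : Int) - 1 else i0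
    let t := PySem.List.slice s (some i) none             -- str[i:]
    let j0 := PySem.Chars.rfind t [')']                   -- t.rfind(')')
    let j := if j0 = -1 then 0 else j0
    PySem.List.slice t none (some (j + 1))                -- t[:j+1]

def parenBit_alt (str : String) : String := String.ofList (parenBitAltGo str.toList)

-- ===== PRECONDITION & SPEC =====
def Spec_parenBit (str : String) (out : String) : Prop := out = parenBit_alt str
instance (str : String) (out : String) : Decidable (Spec_parenBit str out) := by unfold Spec_parenBit; infer_instance

-- ===== CLAIM (what is proved, stated in full; the proofs are below) =====
def Claim_equal_parenBit : Prop := ∀ (str : String), Dom_parenBit str → Spec_parenBit str (parenBit str)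

-- ===== LEMMAS AND PROOFS =====

-- [c] is a prefix of l iff l's first element is c
theorem pvPrefixSingleton (c : Char) (l : List Char) :
    List.isPrefixOf [c] l = true ↔ l[0]? = some c := by
  rw [List.isPrefixOf_iff_prefix]
  cases l with
  | nil => simp
  | cons a t => simp [List.cons_prefix_iff, eq_comm]

theorem pvPrefixSingletonBool (c : Char) (l : List Char) :
    List.isPrefixOf [c] l = (l[0]? == some c) := by
  rw [Bool.eq_iff_iff, pvPrefixSingleton]
  simp

-- find.go never returns a value strictly between -1 and its start index
theorem pvFindGoLB (sub : List Char) (s : List Char) (k : Nat) :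
    PySem.Chars.find.go sub s k = -1 ∨ (k : Int) ≤ PySem.Chars.find.go sub s k := by
  induction s generalizing k with
  | nil =>
    rw [PySem.Chars.find.go]
    split <;> simp
  | cons a t ih =>
    rw [PySem.Chars.find.go]
    split
    · right; omega
    · rcases ih (k + 1) with h | h
      · left; exact h
      · right; omega

-- shifting the start index of find.go
theorem pvFindGoShift (sub : List Char) (hsub : sub ≠ []) (s : List Char) (k : Nat) :
    PySem.Chars.find.go sub s k =
      if PySem.Chars.find.go sub s 0 = -1 then -1 else (k : Int) + PySem.Chars.find.go sub s 0 := by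
  induction s generalizing k with
  | nil =>
    rw [PySem.Chars.find.go, PySem.Chars.find.go]
    simp [List.isEmpty_iff, hsub]
  | cons a t ih =>
    rw [PySem.Chars.find.go, PySem.Chars.find.go]
    split
    · simp
    · rw [ih (k + 1), ih 1]
      rcases pvFindGoLB sub t 0 with h | h <;> split_ifs with h1 <;> push_cast <;> omega

theorem pvFindNil (c : Char) : PySem.Chars.find [] [c] = -1 := by
  simp only [PySem.Chars.find]
  rw [PySem.Chars.find.go]
  simp

-- find on a cons cell, singleton pattern
theorem pvFindCons (c a : Char) (t : List Char) :
    PySem.Chars.find (a :: t) [c] =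
      if a = c then 0
      else if PySem.Chars.find t [c] = -1 then -1 else 1 + PySem.Chars.find t [c] := by
  simp only [PySem.Chars.find]
  rw [PySem.Chars.find.go]
  by_cases h : a = c
  · simp [h]
  · have hp : List.isPrefixOf [c] (a :: t) = false := by
      rw [Bool.eq_false_iff]
      intro hc
      exact h (by simpa using (pvPrefixSingleton c (a :: t)).1 hc)
    rw [hp]
    simp only [if_neg h]
    rw [pvFindGoShift [c] (by simp) t 1]
    push_cast
    split_ifs <;> omega

theorem pvFindLB (c : Char) (s : List Char) :
    PySem.Chars.find s [c] = -1 ∨ 0 ≤ PySem.Chars.find s [c] := by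
  simpa using pvFindGoLB [c] s 0

-- rfind.go, unfolded at 0 and at a successor, singleton pattern
theorem pvRfindGoZero (c : Char) (s : List Char) :
    PySem.Chars.rfind.go s [c] 0 = if s[0]? = some c then 0 else -1 := by
  rw [PySem.Chars.rfind.go, pvPrefixSingletonBool]
  split_ifs with h <;> simp_all

theorem pvRfindGoSucc (c : Char) (s : List Char) (j : Nat) :
    PySem.Chars.rfind.go s [c] (j + 1) =
      if s[j + 1]? = some c then ((j : Int) + 1) else PySem.Chars.rfind.go s [c] j := by
  rw [PySem.Chars.rfind.go, pvPrefixSingletonBool]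
  have h0 : (s.drop (j + 1))[0]? = s[j + 1]? := by
    rw [List.getElem?_drop]
  rw [h0]
  split_ifs with h <;> simp_all

-- rfind.go ignores the last element for start indices below it
theorem pvRfindGoAppend (c b : Char) (m : List Char) (j : Nat) (hj : j < m.length) :
    PySem.Chars.rfind.go (m ++ [b]) [c] j = PySem.Chars.rfind.go m [c] j := by
  induction j with
  | zero =>
    rw [pvRfindGoZero, pvRfindGoZero, List.getElem?_append_left (by omega)]
  | succ j ih =>
    rw [pvRfindGoSucc, pvRfindGoSucc, List.getElem?_append_left (by omega),
      ih (by omega)]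

-- rfind.go from position k where s[k] = c returns k
theorem pvRfindGoHit (c : Char) (s : List Char) (k : Nat) (hk : s[k]? = some c) :
    PySem.Chars.rfind.go s [c] k = (k : Int) := by
  cases k with
  | zero => rw [pvRfindGoZero]; simp [hk]
  | succ j => rw [pvRfindGoSucc]; simp [hk]

theorem pvRfindGoUB (c : Char) (s : List Char) (j : Nat) :
    PySem.Chars.rfind.go s [c] j ≤ (j : Int) := by
  induction j with
  | zero =>
    rw [pvRfindGoZero]
    split_ifs <;> simp
  | succ j ih =>
    rw [pvRfindGoSucc]
    split_ifs with h
    · simp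
    · push_cast
      omega

theorem pvRfindGoNeg (c : Char) (s : List Char) (j : Nat) :
    PySem.Chars.rfind.go s [c] j = -1 ∨ 0 ≤ PySem.Chars.rfind.go s [c] j := by
  induction j with
  | zero =>
    rw [pvRfindGoZero]
    split_ifs <;> simp
  | succ j ih =>
    rw [pvRfindGoSucc]
    split_ifs with h
    · right
      positivity
    · exact ih

theorem pvRfindTop (c : Char) (s : List Char) (hs : s ≠ []) :
    PySem.Chars.rfind s [c] = PySem.Chars.rfind.go s [c] (s.length - 1) := by
  obtain ⟨j, hj⟩ : ∃ j, s.length = j + 1 :=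
    ⟨s.length - 1, by have := List.length_pos_iff.mpr hs; omega⟩
  simp only [PySem.Chars.rfind]
  rw [hj, pvRfindGoSucc]
  have hnone : s[j + 1]? = none := List.getElem?_eq_none (by omega)
  simp [hnone]

-- appending a non-matching last element does not change rfind (singleton pattern)
theorem pvRfindAppendNe (c b : Char) (m : List Char) (hb : b ≠ c) (hm : m ≠ []) :
    PySem.Chars.rfind (m ++ [b]) [c] = PySem.Chars.rfind m [c] := by
  obtain ⟨k, hk⟩ : ∃ k, m.length = k + 1 :=
    ⟨m.length - 1, by have := List.length_pos_iff.mpr hm; omega⟩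
  rw [pvRfindTop c (m ++ [b]) (by simp), pvRfindTop c m hm]
  have hlen : (m ++ [b]).length - 1 = k + 1 := by simp [hk]
  rw [hlen, pvRfindGoSucc]
  have hget : (m ++ [b])[k + 1]? = some b := by
    rw [← hk]
    exact List.getElem?_concat_length
  rw [hget, if_neg (by simpa using hb), pvRfindGoAppend c b m k (by omega), hk]
  norm_num

-- the "t = str[i:]" value of B, factored for the proofs
def pvT (s : List Char) : List Char :=
  PySem.List.slice s
    (some (if PySem.Chars.find s ['('] = -1 then (s.length : Int) - 1 else PySem.Chars.find s ['('])) none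

theorem pvAltT (s : List Char) (hs : s ≠ []) :
    parenBitAltGo s =
      PySem.List.slice (pvT s) none
        (some ((if PySem.Chars.rfind (pvT s) [')'] = -1 then 0 else PySem.Chars.rfind (pvT s) [')']) + 1)) := by
  simp only [parenBitAltGo, if_neg hs, pvT]

theorem pvTCons (a : Char) (t : List Char) (ht : t ≠ []) (ha : a ≠ '(') :
    pvT (a :: t) = pvT t := by
  have htl : ∃ n, t.length = n + 1 :=
    ⟨t.length - 1, by have := List.length_pos_iff.mpr ht; omega⟩
  obtain ⟨n, hn⟩ := htl
  unfold pvT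
  rw [pvFindCons, if_neg ha]
  by_cases hr : PySem.Chars.find t ['('] = -1
  · rw [if_pos hr, if_pos rfl, if_pos hr]
    have h1 : ((a :: t).length : Int) - 1 = ((t.length : Nat) : Int) := by simp
    have h2 : ((t.length : Nat) : Int) - 1 = ((n : Nat) : Int) := by rw [hn]; push_cast; ring
    rw [h1, h2, PySem.List.slice_from_natCast, PySem.List.slice_from_natCast, hn,
      List.drop_succ_cons]
  · rcases pvFindLB '(' t with h | h
    · exact absurd h hr
    · rw [if_neg hr, if_neg (by omega), if_neg hr]
      obtain ⟨r, hrv⟩ : ∃ r : Nat, PySem.Chars.find t ['('] = (r : Int) :=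
        ⟨(PySem.Chars.find t ['(']).toNat, by omega⟩
      rw [hrv]
      have h1 : (1 : Int) + (r : Int) = ((r + 1 : Nat) : Int) := by push_cast; ring
      rw [h1, PySem.List.slice_from_natCast, PySem.List.slice_from_natCast,
        List.drop_succ_cons]

-- B's function on a non-'(' head with length ≥ 2 drops the head (A's first branch)
theorem pvAltStep1 (a : Char) (t : List Char) (ht : t ≠ []) (ha : a ≠ '(') :
    parenBitAltGo (a :: t) = parenBitAltGo t := by
  rw [pvAltT (a :: t) (by simp), pvAltT t ht, pvTCons a t ht ha]

-- with head '(', B's t is the whole string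
theorem pvTHead (s : List Char) (hh : s[0]? = some '(') : pvT s = s := by
  obtain ⟨t, rfl⟩ : ∃ t, s = '(' :: t := by
    cases s with
    | nil => simp at hh
    | cons x t =>
      simp only [List.getElem?_cons_zero, Option.some.injEq] at hh
      exact ⟨t, by rw [hh]⟩
  unfold pvT
  rw [pvFindCons, if_pos rfl, if_neg (by norm_num)]
  simp

-- B's function with head '(' and last ≠ ')' drops the last (A's second branch)
theorem pvAltStep2 (s : List Char) (h2 : 2 ≤ s.length)
    (hh : s[0]? = some '(') (hl : s.getLast? ≠ some ')') :
    parenBitAltGo s = parenBitAltGo s.dropLast := by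
  obtain ⟨m, b, rfl⟩ : ∃ m b, s = m ++ [b] := by
    rcases List.eq_nil_or_concat s with h | ⟨m, b, h⟩
    · subst h; simp at h2
    · exact ⟨m, b, by simpa using h⟩
  have hm : m ≠ [] := by
    rintro rfl; simp at h2
  have hb : b ≠ ')' := by
    intro hbe
    exact hl (by simp [hbe])
  have hdm : (m ++ [b]).dropLast = m := by simp
  have hhm : m[0]? = some '(' := by
    rwa [List.getElem?_append_left (by have := List.length_pos_iff.mpr hm; omega)] at hh
  rw [pvAltT _ (by simp), pvAltT _ (by simpa [hdm]), hdm, pvTHead _ hh, pvTHead _ hhm]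
  rw [pvRfindAppendNe ')' b m hb hm]
  by_cases hj : PySem.Chars.rfind m [')'] = -1
  · rw [if_pos hj]
    have h1 : (0 : Int) + 1 = ((1 : Nat) : Int) := by norm_num
    rw [h1, PySem.List.slice_to_natCast, PySem.List.slice_to_natCast,
      List.take_append_of_le_length (by have := List.length_pos_iff.mpr hm; omega)]
  · rw [if_neg hj]
    obtain ⟨j, hjv⟩ : ∃ j : Nat, PySem.Chars.rfind m [')'] = (j : Int) := by
      have hlb : PySem.Chars.rfind m [')'] = -1 ∨ 0 ≤ PySem.Chars.rfind m [')'] := by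
        rw [pvRfindTop ')' m hm]
        exact pvRfindGoNeg ')' m (m.length - 1)
      rcases hlb with h | h
      · exact absurd h hj
      · exact ⟨(PySem.Chars.rfind m [')']).toNat, by omega⟩
    have hub : PySem.Chars.rfind m [')'] ≤ (m.length : Int) - 1 := by
      rw [pvRfindTop ')' m hm]
      have := pvRfindGoUB ')' m (m.length - 1)
      have := List.length_pos_iff.mpr hm
      omega
    rw [hjv]
    have h1 : ((j : Int) + 1) = ((j + 1 : Nat) : Int) := by push_cast; ring
    rw [h1, PySem.List.slice_to_natCast, PySem.List.slice_to_natCast,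
      List.take_append_of_le_length (by rw [hjv] at hub; omega)]

-- B is the identity on singletons
theorem pvAltSingleton (a : Char) : parenBitAltGo [a] = [a] := by
  rw [pvAltT [a] (by simp)]
  have ht : pvT [a] = [a] := by
    unfold pvT
    rw [pvFindCons, pvFindNil]
    by_cases h : a = '('
    · rw [if_pos h, if_neg (by norm_num)]
      simp
    · rw [if_neg h, if_pos rfl, if_pos rfl]
      simp
  rw [ht]
  have hr : PySem.Chars.rfind [a] [')'] = if a = ')' then 0 else -1 := by
    rw [pvRfindTop ')' [a] (by simp)]
    simp only [List.length_singleton, Nat.sub_self]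
    rw [pvRfindGoZero]
    split_ifs with h1 h2 h2 <;> simp_all
  rw [hr]
  split_ifs with h1 h2 h3 <;> simp_all [PySem.List.slice_to]

-- B is the identity when head is '(' and last is ')'
theorem pvAltFixed (s : List Char) (hs : s ≠ [])
    (hh : s[0]? = some '(') (hl : s.getLast? = some ')') :
    parenBitAltGo s = s := by
  have hlen : 1 ≤ s.length := List.length_pos_iff.mpr hs
  rw [pvAltT s hs, pvTHead s hh]
  have hget : s[s.length - 1]? = some ')' := by
    rwa [← List.getLast?_eq_getElem?]
  have hr : PySem.Chars.rfind s [')'] = ((s.length - 1 : Nat) : Int) := by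
    rw [pvRfindTop ')' s hs]
    exact pvRfindGoHit ')' s (s.length - 1) hget
  rw [hr, if_neg (by omega)]
  have h1 : ((s.length - 1 : Nat) : Int) + 1 = ((s.length : Nat) : Int) := by
    omega
  rw [h1, PySem.List.slice_to_natCast, List.take_length]

theorem pvGoEq (s : List Char) : parenBitGo s = parenBitAltGo s := by
  fun_induction parenBitGo s with
  | case1 => simp [parenBitAltGo]
  | case2 s hne hcond ih =>
    obtain ⟨h2, hhead⟩ := hcond
    rcases s with _ | ⟨a, t⟩
    · exact absurd rfl hne
    · have ht : t ≠ [] := by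
        rintro rfl; simp at h2
      have ha : a ≠ '(' := by
        intro hae
        exact hhead (by simp [hae])
      rw [PySem.List.slice_from_one] at ih ⊢
      simp only [List.tail_cons] at ih ⊢
      rw [ih, pvAltStep1 a t ht ha]
  | case3 s hne hc1 hcond ih =>
    obtain ⟨h2, hlast⟩ := hcond
    have hh : s[0]? = some '(' := by
      have h := not_not.mp (not_and.mp hc1 h2)
      rwa [PySem.List.pyGet?_zero] at h
    have hl : s.getLast? ≠ some ')' := by
      rwa [PySem.List.pyGet?_neg_one] at hlast
    rw [PySem.List.slice_to_neg_one] at ih ⊢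
    rw [ih, ← pvAltStep2 s h2 hh hl]
  | case4 s hne hc1 hc2 =>
    by_cases h2 : 2 ≤ s.length
    · have hh : s[0]? = some '(' := by
        have h := not_not.mp (not_and.mp hc1 h2)
        rwa [PySem.List.pyGet?_zero] at h
      have hl : s.getLast? = some ')' := by
        have h := not_not.mp (not_and.mp hc2 h2)
        rwa [PySem.List.pyGet?_neg_one] at h
      exact (pvAltFixed s hne hh hl).symm
    · obtain ⟨a, rfl⟩ : ∃ a, s = [a] := by
        rcases s with _ | ⟨a, t⟩
        · exact absurd rfl hne
        · rcases t with _ | ⟨x, u⟩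
          · exact ⟨a, rfl⟩
          · exfalso
            simp at h2
      exact (pvAltSingleton a).symm

-- ===== VERDICT (by name: the statement is the Claim_ definition above) =====
theorem parenBit_spec : Claim_equal_parenBit := by
  intro str _
  unfold Spec_parenBit parenBit parenBit_alt
  rw [pvGoEq]
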